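-- pv_equiv track=rewrite | github.com/mikuz0/python_utility | rutube_downloader/config.py | get_level_for_resolution
-- ===== SOURCE A (Python) =====
-- def get_level_for_resolution(width, height, fps=30):
--     """
--     Возвращает рекомендуемый уровень H.264 для разрешения
--     """
--     # Таблица уровней H.264
--     levels = {
--         '1':    {'max_mbps': 1485,   'max_fs': 99,   'max_dpb': 396},
--         '1.1':  {'max_mbps': 3000,   'max_fs': 396,  'max_dpb': 900},
--         '1.2':  {'max_mbps': 6000,   'max_fs': 396,  'max_dpb': 2376},
--         '1.3':  {'max_mbps': 11880,  'max_fs': 396,  'max_dpb': 2376},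
--         '2':    {'max_mbps': 11880,  'max_fs': 396,  'max_dpb': 2376},
--         '2.1':  {'max_mbps': 19800,  'max_fs': 792,  'max_dpb': 4752},
--         '2.2':  {'max_mbps': 20250,  'max_fs': 1620, 'max_dpb': 8100},
--         '3':    {'max_mbps': 40500,  'max_fs': 1620, 'max_dpb': 8100},
--         '3.1':  {'max_mbps': 108000, 'max_fs': 3600, 'max_dpb': 18000},
--         '3.2':  {'max_mbps': 216000, 'max_fs': 5120, 'max_dpb': 20480},
--         '4':    {'max_mbps': 245760, 'max_fs': 8192, 'max_dpb': 32768},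
--         '4.1':  {'max_mbps': 245760, 'max_fs': 8192, 'max_dpb': 32768},
--         '4.2':  {'max_mbps': 522240, 'max_fs': 8704, 'max_dpb': 34816},
--         '5':    {'max_mbps': 589824, 'max_fs': 22080, 'max_dpb': 110400},
--         '5.1':  {'max_mbps': 983040, 'max_fs': 36864, 'max_dpb': 184320},
--         '5.2':  {'max_mbps': 2073600, 'max_fs': 36864, 'max_dpb': 184320}
--     }
--
--     # Вычисляем параметры для нашего видео
--     mb_width = (width + 15) // 16
--     mb_height = (height + 15) // 16
--     mb_per_frame = mb_width * mb_height
--     mb_per_second = mb_per_frame * fps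
--     frame_size = mb_per_frame
--
--     # Ищем минимальный подходящий уровень
--     selected_level = '5.2'
--     for level, limits in levels.items():
--         if (mb_per_second <= limits['max_mbps'] and
--             frame_size <= limits['max_fs']):
--             selected_level = level
--             break
--
--     # Преобразуем для ffmpeg (убираем точку)
--     return selected_level.replace('.', '')
-- ===== SOURCE B (Python) =====
-- _LEVEL_KEYS = ['1', '1.1', '1.2', '1.3', '2', '2.1', '2.2', '3',
--                '3.1', '3.2', '4', '4.1', '4.2', '5', '5.1', '5.2']
-- _MAX_MBPS = [1485, 3000, 6000, 11880, 11880, 19800, 20250, 40500,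
--              108000, 216000, 245760, 245760, 522240, 589824, 983040, 2073600]
-- _MAX_FS = [99, 396, 396, 396, 396, 792, 1620, 1620,
--            3600, 5120, 8192, 8192, 8704, 22080, 36864, 36864]
--
--
-- def _first_at_least(thresholds, value):
--     """Smallest index whose threshold is >= value; last index if none."""
--     for i, t in enumerate(thresholds):
--         if value <= t:
--             return i
--     return len(thresholds) - 1
--
--
-- def get_level_for_resolution(width, height, fps=30):
--     """
--     Возвращает рекомендуемый уровень H.264 для разрешения
--     """
--     mb_per_frame = ((width + 15) // 16) * ((height + 15) // 16)
--     i1 = _first_at_least(_MAX_MBPS, mb_per_frame * fps)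
--     i2 = _first_at_least(_MAX_FS, mb_per_frame)
--     return _LEVEL_KEYS[max(i1, i2)].replace('.', '')
-- ===== Notes on version B (the rewrite author's own statement) =====
-- stated objective: alternative
-- what changed: Replaces A's single interleaved first-match scan over a dict of per-level limit dicts by two independent monotone threshold searches over parallel sorted columns (macroblock rate and frame size), combined by taking the larger of the two indices.
import Mathlib
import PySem

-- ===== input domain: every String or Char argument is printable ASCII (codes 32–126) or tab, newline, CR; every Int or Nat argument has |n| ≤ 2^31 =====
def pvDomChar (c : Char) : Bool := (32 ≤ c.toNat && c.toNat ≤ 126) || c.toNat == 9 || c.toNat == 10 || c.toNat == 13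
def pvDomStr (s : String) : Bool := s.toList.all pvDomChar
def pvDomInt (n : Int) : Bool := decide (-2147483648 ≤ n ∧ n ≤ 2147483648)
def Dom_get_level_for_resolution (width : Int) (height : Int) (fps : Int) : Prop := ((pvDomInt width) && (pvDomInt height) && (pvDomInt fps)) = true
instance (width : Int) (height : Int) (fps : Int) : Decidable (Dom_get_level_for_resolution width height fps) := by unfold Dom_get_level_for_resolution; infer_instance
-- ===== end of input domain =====

-- B replaces A's interleaved first-match scan over the level table by two independent
-- monotone threshold searches combined with max (alternative decomposition, same cost).


-- ===== PORT A =====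
-- A's inner dicts {'max_mbps': …, 'max_fs': …, 'max_dpb': …} are ported as positional
-- triples (max_mbps, max_fs, max_dpb); the three key lookups are exact (keys present).
def pvLevelsA : List (String × (Int × Int × Int)) :=
  [("1",   (1485,   99,   396)),
   ("1.1", (3000,   396,  900)),
   ("1.2", (6000,   396,  2376)),
   ("1.3", (11880,  396,  2376)),
   ("2",   (11880,  396,  2376)),
   ("2.1", (19800,  792,  4752)),
   ("2.2", (20250,  1620, 8100)),
   ("3",   (40500,  1620, 8100)),
   ("3.1", (108000, 3600, 18000)),
   ("3.2", (216000, 5120, 20480)),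
   ("4",   (245760, 8192, 32768)),
   ("4.1", (245760, 8192, 32768)),
   ("4.2", (522240, 8704, 34816)),
   ("5",   (589824, 22080, 110400)),
   ("5.1", (983040, 36864, 184320)),
   ("5.2", (2073600, 36864, 184320))]

-- the 'for level, limits in levels.items(): … break' loop: first match wins, else keep selected_level
def pvScanA : List (String × (Int × Int × Int)) → Int → Int → String → String
  | [], _, _, sel => sel
  | (lvl, lim) :: rest, mPerSec, fSize, sel =>
    if mPerSec ≤ lim.1 ∧ fSize ≤ lim.2.1 then lvl else pvScanA rest mPerSec fSize sel

def get_level_for_resolution (width : Int) (height : Int) (fps : Int) : String :=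
  let mb_width := PySem.Int.floordiv (width + 15) 16
  let mb_height := PySem.Int.floordiv (height + 15) 16
  let mb_per_frame := mb_width * mb_height
  let mb_per_second := mb_per_frame * fps
  let frame_size := mb_per_frame
  let selected_level := pvScanA pvLevelsA mb_per_second frame_size "5.2"
  PySem.Str.replace selected_level "." ""

-- ===== PORT B =====
def pvLevelKeys : List String :=
  ["1", "1.1", "1.2", "1.3", "2", "2.1", "2.2", "3",
   "3.1", "3.2", "4", "4.1", "4.2", "5", "5.1", "5.2"]

def pvMaxMbps : List Int :=
  [1485, 3000, 6000, 11880, 11880, 19800, 20250, 40500,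
   108000, 216000, 245760, 245760, 522240, 589824, 983040, 2073600]

def pvMaxFs : List Int :=
  [99, 396, 396, 396, 396, 792, 1620, 1620,
   3600, 5120, 8192, 8192, 8704, 22080, 36864, 36864]

-- _first_at_least: enumerate loop with an index counter; default len-1 on fall-through
def pvFirstAtLeastAux (n : Nat) (v : Int) : List Int → Nat → Nat
  | [], _ => n - 1
  | t :: rest, i => if v ≤ t then i else pvFirstAtLeastAux n v rest (i + 1)

def pvFirstAtLeast (thresholds : List Int) (value : Int) : Nat :=
  pvFirstAtLeastAux thresholds.length value thresholds 0

def get_level_for_resolution_alt (width : Int) (height : Int) (fps : Int) : String :=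
  let mb_per_frame := (PySem.Int.floordiv (width + 15) 16) * (PySem.Int.floordiv (height + 15) 16)
  let i1 := pvFirstAtLeast pvMaxMbps (mb_per_frame * fps)
  let i2 := pvFirstAtLeast pvMaxFs mb_per_frame
  PySem.Str.replace (pvLevelKeys.getD (max i1 i2) "") "." ""

-- ===== PRECONDITION & SPEC =====
def Spec_get_level_for_resolution (width : Int) (height : Int) (fps : Int) (out : String) : Prop := out = get_level_for_resolution_alt width height fps
instance (width : Int) (height : Int) (fps : Int) (out : String) : Decidable (Spec_get_level_for_resolution width height fps out) := by unfold Spec_get_level_for_resolution; infer_instance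

-- ===== CLAIM (what is proved, stated in full; the proofs are below) =====
def Claim_equal_get_level_for_resolution : Prop := ∀ (width : Int) (height : Int) (fps : Int), Dom_get_level_for_resolution width height fps → Spec_get_level_for_resolution width height fps (get_level_for_resolution width height fps)

-- ===== LEMMAS AND PROOFS =====

-- A's scan is "first row passing both tests, else the default"
theorem pvScanA_eq_find? (rows : List (String × (Int × Int × Int))) (m f : Int) (sel : String) :
    pvScanA rows m f sel =
      ((rows.find? (fun r => decide (m ≤ r.2.1) && decide (f ≤ r.2.2.1))).map Prod.fst).getD sel := by
  induction rows with
  | nil => rfl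
  | cons r rest ih =>
    by_cases h : m ≤ r.2.1 ∧ f ≤ r.2.2.1
    · simp [pvScanA, List.find?, h.1, h.2]
    · have hb : (decide (m ≤ r.2.1) && decide (f ≤ r.2.2.1)) = false := by
        simp only [Bool.and_eq_false_iff, decide_eq_false_iff_not]
        tauto
      simp [pvScanA, List.find?, h, hb, ih]

-- B's index search is findIdx? with the last index as fall-through default
theorem pvAux_eq (ts : List Int) (v : Int) (n : Nat) :
    ∀ i, pvFirstAtLeastAux n v ts i =
      (List.findIdx? (fun t => decide (v ≤ t)) ts).elim (n - 1) (fun j => i + j) := by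
  induction ts with
  | nil => intro i; rfl
  | cons t rest ih =>
    intro i
    by_cases h : v ≤ t
    · simp [pvFirstAtLeastAux, List.findIdx?_cons, h]
    · rw [List.findIdx?_cons]
      simp only [pvFirstAtLeastAux, h, decide_false, ih (i + 1), Bool.false_eq_true, ite_false]
      cases hfi : List.findIdx? (fun t => decide (v ≤ t)) rest
      · simp [Option.elim]
      · simp [Option.elim]; omega

theorem pvCore (m f : Int) :
    pvScanA pvLevelsA m f "5.2" =
      pvLevelKeys.getD (max (pvFirstAtLeast pvMaxMbps m) (pvFirstAtLeast pvMaxFs f)) "" := by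
  have hPair1 : List.Pairwise (fun r s : String × (Int × Int × Int) => r.2.1 ≤ s.2.1) pvLevelsA := by
    decide
  have hPair2 : List.Pairwise (fun r s : String × (Int × Int × Int) => r.2.2.1 ≤ s.2.2.1) pvLevelsA := by
    decide
  have hlen : pvLevelsA.length = 16 := by decide
  have hmono1 := List.pairwise_iff_getElem.mp hPair1
  have hmono2 := List.pairwise_iff_getElem.mp hPair2
  -- index monotonicity with ≤ (equal indices included)
  have hmono1' : ∀ (i j : Nat) (hi : i < pvLevelsA.length) (hj : j < pvLevelsA.length),
      i ≤ j → pvLevelsA[i].2.1 ≤ pvLevelsA[j].2.1 := by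
    intro i j hi hj hij
    rcases Nat.eq_or_lt_of_le hij with rfl | h
    · exact le_refl _
    · exact hmono1 i j hi hj h
  have hmono2' : ∀ (i j : Nat) (hi : i < pvLevelsA.length) (hj : j < pvLevelsA.length),
      i ≤ j → pvLevelsA[i].2.2.1 ≤ pvLevelsA[j].2.2.1 := by
    intro i j hi hj hij
    rcases Nat.eq_or_lt_of_le hij with rfl | h
    · exact le_refl _
    · exact hmono2 i j hi hj h
  -- both of B's searches as findIdx? over the row list
  have h1 : pvFirstAtLeast pvMaxMbps m =
      (List.findIdx? (fun r => decide (m ≤ r.2.1)) pvLevelsA).elim 15 (fun j => 0 + j) := by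
    show pvFirstAtLeastAux 16 m pvMaxMbps 0 = _
    rw [pvAux_eq]
    rfl
  have h2 : pvFirstAtLeast pvMaxFs f =
      (List.findIdx? (fun r => decide (f ≤ r.2.2.1)) pvLevelsA).elim 15 (fun j => 0 + j) := by
    show pvFirstAtLeastAux 16 f pvMaxFs 0 = _
    rw [pvAux_eq]
    rfl
  have hkeys : pvLevelKeys = pvLevelsA.map Prod.fst := by rfl
  rw [pvScanA_eq_find?, List.find?_eq_bind_findIdx?_getElem?, h1, h2]
  cases hf1 : List.findIdx? (fun r => decide (m ≤ r.2.1)) pvLevelsA with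
  | none =>
    -- no level carries the macroblock rate: A falls through to '5.2', B lands on the last index
    have hall : ∀ r ∈ pvLevelsA, (decide (m ≤ r.2.1)) = false := List.findIdx?_eq_none_iff.mp hf1
    have hP : List.findIdx? (fun r => decide (m ≤ r.2.1) && decide (f ≤ r.2.2.1)) pvLevelsA = none := by
      rw [List.findIdx?_eq_none_iff]
      intro r hr
      simp [hall r hr]
    rw [hP]
    cases hf2 : List.findIdx? (fun r => decide (f ≤ r.2.2.1)) pvLevelsA with
    | none => rfl
    | some j2 =>
      obtain ⟨hj2lt, -, -⟩ := List.findIdx?_eq_some_iff_getElem.mp hf2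
      simp only [Option.elim]
      have hmax : max 15 (0 + j2) = 15 := by omega
      rw [hmax]
      rfl
  | some j1 =>
    obtain ⟨hj1lt, hj1p, hj1min⟩ := List.findIdx?_eq_some_iff_getElem.mp hf1
    cases hf2 : List.findIdx? (fun r => decide (f ≤ r.2.2.1)) pvLevelsA with
    | none =>
      -- no level carries the frame size: same fall-through on both sides
      have hall : ∀ r ∈ pvLevelsA, (decide (f ≤ r.2.2.1)) = false := List.findIdx?_eq_none_iff.mp hf2
      have hP : List.findIdx? (fun r => decide (m ≤ r.2.1) && decide (f ≤ r.2.2.1)) pvLevelsA = none := by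
        rw [List.findIdx?_eq_none_iff]
        intro r hr
        simp [hall r hr]
      rw [hP]
      simp only [Option.elim]
      have hmax : max (0 + j1) 15 = 15 := by omega
      rw [hmax]
      rfl
    | some j2 =>
      obtain ⟨hj2lt, hj2p, hj2min⟩ := List.findIdx?_eq_some_iff_getElem.mp hf2
      have hmaxlt : max j1 j2 < pvLevelsA.length := by omega
      -- the combined first-match scan stops exactly at max j1 j2
      have hP : List.findIdx? (fun r => decide (m ≤ r.2.1) && decide (f ≤ r.2.2.1)) pvLevelsA
          = some (max j1 j2) := by
        rw [List.findIdx?_eq_some_iff_getElem]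
        refine ⟨hmaxlt, ?_, ?_⟩
        · have hm : m ≤ pvLevelsA[max j1 j2].2.1 :=
            le_trans (of_decide_eq_true hj1p)
              (hmono1' j1 (max j1 j2) hj1lt hmaxlt (Nat.le_max_left j1 j2))
          have hfs : f ≤ pvLevelsA[max j1 j2].2.2.1 :=
            le_trans (of_decide_eq_true hj2p)
              (hmono2' j2 (max j1 j2) hj2lt hmaxlt (Nat.le_max_right j1 j2))
          simp [hm, hfs]
        · intro j hj
          rcases Nat.lt_or_ge j j1 with hlt | hge
          · simp [hj1min j hlt]
          · have : j < j2 := by omega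
            simp [hj2min j this]
      rw [hP]
      have hget : pvLevelsA[max j1 j2]? = some pvLevelsA[max j1 j2] := List.getElem?_eq_getElem hmaxlt
      simp only [Option.bind, hget, Option.map, Option.getD, Option.elim]
      have hmax : max (0 + j1) (0 + j2) = max j1 j2 := by omega
      rw [hmax, hkeys]
      rw [List.getD_eq_getElem (pvLevelsA.map Prod.fst) "" (by simpa using hmaxlt)]
      rw [List.getElem_map]

-- ===== VERDICT (by name: the statement is the Claim_ definition above) =====
theorem get_level_for_resolution_spec : Claim_equal_get_level_for_resolution := by
  intro width height fps _
  unfold Spec_get_level_for_resolution get_level_for_resolution get_level_for_resolution_alt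
  simp only []
  rw [pvCore]
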